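-- pv_equiv track=rewrite | github.com/miczho/competitive-coding | src/kick_start_21_h_1.py | transformStr
-- ===== SOURCE A (Python) =====
-- def transformStr(s, f):
--     ans = 0
--
--     for a in s:
--         tmp1 = 26
--         for b in f:
--             tmp2 = max(ord(a), ord(b)) - min(ord(a), ord(b))
--             if tmp2 > 13:
--                 tmp2 = 26 - tmp2
--             tmp1 = min(tmp1, tmp2)
--         ans += tmp1
--
--     return ans
-- ===== SOURCE B (Python) =====
-- # B: one counting pass over s, then one min-distance scan per DISTINCT character,
-- # summed with multiplicities -- instead of A's inner scan of f for every character of s.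
-- def _best(a, f):
--     m = 26
--     for b in f:
--         d = abs(ord(a) - ord(b))
--         if d > 13:
--             d = 26 - d
--         if d < m:
--             m = d
--     return m
--
--
-- def transformStr(s, f):
--     counts = {}
--     for a in s:
--         counts[a] = counts.get(a, 0) + 1
--     total = 0
--     for a, cnt in counts.items():
--         total += cnt * _best(a, f)
--     return total
-- ===== Notes on version B (the rewrite author's own statement) =====
-- stated objective: faster
-- what changed: B counts character multiplicities in one pass over s and scans f only once per DISTINCT character of s, summing count*min-distance, instead of A's inner scan of f for every character of s.
import Mathlib
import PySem

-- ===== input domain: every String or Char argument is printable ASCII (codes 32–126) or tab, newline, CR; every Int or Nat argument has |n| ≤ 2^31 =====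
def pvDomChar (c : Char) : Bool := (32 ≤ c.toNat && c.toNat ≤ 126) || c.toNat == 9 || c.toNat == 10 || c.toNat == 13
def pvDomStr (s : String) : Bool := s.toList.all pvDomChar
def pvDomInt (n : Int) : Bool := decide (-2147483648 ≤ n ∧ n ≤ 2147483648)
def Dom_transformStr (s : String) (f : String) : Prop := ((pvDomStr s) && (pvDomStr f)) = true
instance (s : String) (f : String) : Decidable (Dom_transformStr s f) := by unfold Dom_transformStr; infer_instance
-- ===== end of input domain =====

-- B replaces A's per-character inner scan of f by one counting pass over s and one
-- scan of f per DISTINCT character of s (objective: faster on repetitive strings).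

-- ===== PORT A =====
def transformStr (s : String) (f : String) : Int :=
  s.toList.foldl (fun ans a =>
    ans + f.toList.foldl (fun tmp1 b =>
      let tmp2 : Int := max (a.toNat : Int) (b.toNat : Int) - min (a.toNat : Int) (b.toNat : Int)
      let tmp2 := if tmp2 > 13 then 26 - tmp2 else tmp2
      min tmp1 tmp2) 26) 0

-- ===== PORT B =====
def pvBest (a : Char) (f : List Char) : Int :=
  f.foldl (fun m b =>
    let d : Int := |(a.toNat : Int) - (b.toNat : Int)|
    let d := if d > 13 then 26 - d else d
    if d < m then d else m) 26

def transformStr_alt (s : String) (f : String) : Int :=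
  let counts : PySem.Dict Char Int :=
    s.toList.foldl (fun d a => d.insert a (d.getD a 0 + 1)) PySem.Dict.empty
  counts.items.foldl (fun total p => total + p.2 * pvBest p.1 f.toList) 0

-- ===== PRECONDITION & SPEC =====
def Spec_transformStr (s : String) (f : String) (out : Int) : Prop := out = transformStr_alt s f
instance (s : String) (f : String) (out : Int) : Decidable (Spec_transformStr s f out) := by unfold Spec_transformStr; infer_instance

-- ===== CLAIM (what is proved, stated in full; the proofs are below) =====
def Claim_equal_transformStr : Prop := ∀ (s : String) (f : String), Dom_transformStr s f → Spec_transformStr s f (transformStr s f)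

-- ===== LEMMAS AND PROOFS =====

-- A's inner fold over f computes exactly pvBest: the two step functions are pointwise equal.
theorem inner_eq_pvBest (a : Char) (fl : List Char) :
    fl.foldl (fun tmp1 b =>
      let tmp2 : Int := max (a.toNat : Int) (b.toNat : Int) - min (a.toNat : Int) (b.toNat : Int)
      let tmp2 := if tmp2 > 13 then 26 - tmp2 else tmp2
      min tmp1 tmp2) 26 = pvBest a fl := by
  unfold pvBest
  refine PySem.List.foldl_congr_mem fl _ _ 26 (fun m b _ => ?_)
  dsimp only
  have habs : |(a.toNat : Int) - (b.toNat : Int)|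
      = max (a.toNat : Int) (b.toNat : Int) - min (a.toNat : Int) (b.toNat : Int) := by
    rcases le_total ((a.toNat : Int)) ((b.toNat : Int)) with h | h
    · rw [abs_of_nonpos (by omega)]; omega
    · rw [abs_of_nonneg (by omega)]; omega
  rw [habs]
  split_ifs <;> omega

-- the list of values A sums equals, per element, pvBest
theorem transformStr_eq_sum (s f : String) :
    transformStr s f = (s.toList.map (fun a => pvBest a f.toList)).sum := by
  unfold transformStr
  rw [PySem.List.foldl_congr_mem s.toList _
      (fun ans a => ans + pvBest a f.toList) 0
      (fun ans a _ => by rw [inner_eq_pvBest])]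
  rw [PySem.List.foldl_add s.toList (fun a => pvBest a f.toList) 0]
  simp

-- B's value: sum over distinct characters with multiplicities
theorem transformStr_alt_eq_sum (s f : String) :
    transformStr_alt s f =
      ((PySem.Set.ofList s.toList).map
        (fun a => (s.toList.count a : Int) * pvBest a f.toList)).sum := by
  unfold transformStr_alt
  dsimp only
  rw [PySem.Dict.foldl_insert_getD_add_one_eq_counter, PySem.Dict.items_counter]
  rw [PySem.List.foldl_add
      ((PySem.Set.ofList s.toList).map (fun k => (k, (List.count k s.toList : Int))))
      (fun p => p.2 * pvBest p.1 f.toList) 0]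
  simp [List.map_map, Function.comp_def]

-- grouping a sum by distinct elements
theorem sum_group (l : List Char) (g : Char → Int) :
    (l.map g).sum = ((PySem.Set.ofList l).map (fun a => (l.count a : Int) * g a)).sum := by
  rw [Finset.sum_list_map_count l g]
  rw [← List.sum_toFinset (fun a => (l.count a : Int) * g a) (PySem.Set.nodup_ofList l)]
  have hfs : (PySem.Set.ofList l).toFinset = l.toFinset := by
    apply Finset.ext; intro x
    simp [PySem.Set.mem_ofList]
  rw [hfs]
  refine Finset.sum_congr rfl (fun x _ => ?_)
  simp
-- ===== VERDICT (by name: the statement is the Claim_ definition above) =====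
theorem transformStr_spec : Claim_equal_transformStr := by
  intro s f _
  unfold Spec_transformStr
  rw [transformStr_eq_sum, transformStr_alt_eq_sum, sum_group]
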